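-- pv_equiv track=rewrite | github.com/xyaocao/CQS-SMART | Schema-Linking/RSL-SQL-Bird/src/enhance_ppl_with_column_meaning.py | build_column_meaning_index
-- ===== SOURCE A (Python) =====
-- from typing import Dict, Any, List
--
-- def build_column_meaning_index(column_meaning_data: Dict[str, str]) -> Dict[str, Dict[str, str]]:
--     """
--     Build an index for fast lookup by db_id.
--
--     Input format: "db_id|table|column": "description"
--     Output format: {db_id: {"table.column": "description", ...}, ...}
--     """
--     index = {}
--     for key, description in column_meaning_data.items():
--         parts = key.split('|')
--         if len(parts) == 3:
--             db_id, table, column = parts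
--             if db_id not in index:
--                 index[db_id] = {}
--             # Store with table.column format for consistency with Spider
--             index[db_id][f"{table}.{column}"] = description
--     return index
-- ===== SOURCE B (Python) =====
-- def build_column_meaning_index(column_meaning_data):
--     """Two-phase: filter/split into records, then group records by db_id."""
--     records = []
--     for key, description in column_meaning_data.items():
--         parts = key.split('|')
--         if len(parts) == 3:
--             db_id, table, column = parts
--             records.append((db_id, table + '.' + column, description))
--     index = {}
--     for db_id in dict.fromkeys(db for db, _, _ in records):
--         index[db_id] = {tc: d for db, tc, d in records if db == db_id}
--     return index
-- ===== Notes on version B (the rewrite author's own statement) =====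
-- stated objective: alternative
-- what changed: Replaces the single incremental check-if-present-then-mutate pass over a nested dict with a two-phase shape: first build the flat list of valid (db_id, 'table.column', description) records, then group them by first-occurrence db_id via dict.fromkeys and a per-group dict comprehension.
import Mathlib
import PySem

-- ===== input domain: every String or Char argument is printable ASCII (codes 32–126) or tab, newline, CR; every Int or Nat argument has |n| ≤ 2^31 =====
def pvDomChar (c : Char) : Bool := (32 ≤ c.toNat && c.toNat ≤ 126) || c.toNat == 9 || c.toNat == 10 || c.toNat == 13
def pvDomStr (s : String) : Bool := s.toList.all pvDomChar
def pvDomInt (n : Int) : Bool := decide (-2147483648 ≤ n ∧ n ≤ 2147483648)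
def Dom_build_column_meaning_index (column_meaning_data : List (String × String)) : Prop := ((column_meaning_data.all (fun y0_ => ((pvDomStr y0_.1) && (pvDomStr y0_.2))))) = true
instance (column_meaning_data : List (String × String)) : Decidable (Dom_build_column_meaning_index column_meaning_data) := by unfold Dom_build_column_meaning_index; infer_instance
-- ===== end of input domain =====

-- B replaces A's incremental check-then-mutate nested-dict pass by a two-phase shape
-- (flat record list, then group by first-occurrence db_id); objective: alternative, same cost class.

-- ===== PORT A =====
def build_column_meaning_index (column_meaning_data : List (String × String)) : List (String × List (String × String)) :=
  (column_meaning_data.foldl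
    (fun index kv =>
      match PySem.Str.split? kv.1 "|" with
      | some [db_id, table, column] =>
        let index := if index.contains db_id then index else index.insert db_id PySem.Dict.empty
        index.insert db_id ((index.getD db_id PySem.Dict.empty).insert (table ++ "." ++ column) kv.2)
      | _ => index)
    (PySem.Dict.empty : PySem.Dict String (PySem.Dict String String))).items.map
    (fun p => (p.1, p.2.items))

-- ===== PORT B =====
-- phase 1 of Source B: the flat list of valid (db_id, "table.column", description) records
def pvRecords (column_meaning_data : List (String × String)) : List (String × String × String) :=
  column_meaning_data.foldl
    (fun records kv =>
      -- "|" is a non-empty literal separator, so Python's key.split('|') never raises: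
      -- PySem.Str.split? is always `some`; `.getD []` is exact here
      let parts := (PySem.Str.split? kv.1 "|").getD []
      if parts.length = 3 then
        records ++ [(parts[0]!, parts[1]! ++ "." ++ parts[2]!, kv.2)]
      else records)
    []

-- phase 2 of Source B: for each first-occurrence db_id, the inner dict comprehension over its records
def build_column_meaning_index_alt (column_meaning_data : List (String × String)) : List (String × List (String × String)) :=
  ((PySem.List.dedup ((pvRecords column_meaning_data).map (·.1))).foldl
    (fun index db_id =>
      index.insert db_id
        (((pvRecords column_meaning_data).filter (fun r => r.1 == db_id)).foldl
          (fun inner r => inner.insert r.2.1 r.2.2) PySem.Dict.empty))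
    (PySem.Dict.empty : PySem.Dict String (PySem.Dict String String))).items.map
    (fun p => (p.1, p.2.items))

-- ===== PRECONDITION & SPEC =====
def Spec_build_column_meaning_index (column_meaning_data : List (String × String)) (out : List (String × List (String × String))) : Prop := out = build_column_meaning_index_alt column_meaning_data
instance (column_meaning_data : List (String × String)) (out : List (String × List (String × String))) : Decidable (Spec_build_column_meaning_index column_meaning_data out) := by unfold Spec_build_column_meaning_index; infer_instance

-- ===== CLAIM (what is proved, stated in full; the proofs are below) =====
def Claim_equal_build_column_meaning_index : Prop := ∀ (column_meaning_data : List (String × String)), Dom_build_column_meaning_index column_meaning_data → Spec_build_column_meaning_index column_meaning_data (build_column_meaning_index column_meaning_data)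

-- ===== LEMMAS AND PROOFS =====

-- the per-record step A's loop performs, after collapsing the ensure-present insert
def pvIns (d : PySem.Dict String (PySem.Dict String String)) (r : String × String × String) :
    PySem.Dict String (PySem.Dict String String) :=
  d.insert r.1 ((d.getD r.1 PySem.Dict.empty).insert r.2.1 r.2.2)

-- the record extractor both loops apply to one dict item
def pvRec (kv : String × String) : Option (String × String × String) :=
  match PySem.Str.split? kv.1 "|" with
  | some [db_id, table, column] => some (db_id, table ++ "." ++ column, kv.2)
  | _ => none

theorem pvIns_collapse (d : PySem.Dict String (PySem.Dict String String))
    (db tc : String) (desc : String) :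
    (let d' := if d.contains db then d else d.insert db PySem.Dict.empty
     d'.insert db ((d'.getD db PySem.Dict.empty).insert tc desc)) = pvIns d (db, tc, desc) := by
  by_cases h : d.contains db = true
  · simp [h, pvIns]
  · simp only [Bool.not_eq_true] at h
    simp [h, pvIns, PySem.Dict.insert_insert_self, PySem.Dict.getD_insert_self,
      PySem.Dict.getD_of_not_contains d PySem.Dict.empty h]

theorem pvFoldA_eq (data : List (String × String))
    (d : PySem.Dict String (PySem.Dict String String)) :
    data.foldl
      (fun index kv =>
        match PySem.Str.split? kv.1 "|" with
        | some [db_id, table, column] =>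
          let index := if index.contains db_id then index else index.insert db_id PySem.Dict.empty
          index.insert db_id ((index.getD db_id PySem.Dict.empty).insert (table ++ "." ++ column) kv.2)
        | _ => index) d
    = (data.filterMap pvRec).foldl pvIns d := by
  induction data generalizing d with
  | nil => rfl
  | cons kv rest ih =>
    simp only [List.foldl_cons, List.filterMap_cons]
    rcases h : PySem.Str.split? kv.1 "|" with _ | (_ | ⟨a, _ | ⟨b, _ | ⟨c, _ | _⟩⟩⟩) <;>
      simp [pvRec, h, ih, ← pvIns_collapse]

theorem pvFoldl_push {A B : Type} (g : List B -> A -> List B) (f : A -> Option B)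
    (hg : forall acc x, g acc x = acc ++ (f x).toList) :
    forall (l : List A) (acc : List B), l.foldl g acc = acc ++ l.filterMap f := by
  intro l
  induction l with
  | nil => simp
  | cons x rest ih =>
    intro acc
    rw [List.foldl_cons, hg, ih, List.filterMap_cons]
    cases h : f x <;> simp

theorem pvRecords_eq (data : List (String × String)) :
    pvRecords data = data.filterMap pvRec := by
  have hstep : forall (acc : List (String × String × String)) (kv : String × String),
      (let parts := (PySem.Str.split? kv.1 "|").getD []
       if parts.length = 3 then
         acc ++ [(parts[0]!, parts[1]! ++ "." ++ parts[2]!, kv.2)]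
       else acc) = acc ++ (pvRec kv).toList := by
    intro acc kv
    rcases h : PySem.Str.split? kv.1 "|" with _ | (_ | ⟨a, _ | ⟨b, _ | ⟨c, _ | _⟩⟩⟩) <;>
      simp [pvRec, h]
  rw [pvRecords, pvFoldl_push _ pvRec hstep data [], List.nil_append]

theorem pvGetD_foldl (rs : List (String × String × String))
    (d : PySem.Dict String (PySem.Dict String String)) (db : String) :
    (rs.foldl pvIns d).getD db PySem.Dict.empty
      = (rs.filter (fun r => r.1 == db)).foldl
          (fun inner r => inner.insert r.2.1 r.2.2) (d.getD db PySem.Dict.empty) := by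
  induction rs generalizing d with
  | nil => rfl
  | cons r rest ih =>
    simp only [List.foldl_cons, List.filter_cons]
    by_cases h : r.1 = db
    · simp [h, ih, pvIns]
    · have hb : (r.1 == db) = false := by simp [h]
      simp [hb, ih, pvIns, PySem.Dict.getD_insert, Ne.symm h]

theorem pvKeys_foldl (rs : List (String × String × String)) :
    (rs.foldl pvIns (PySem.Dict.empty : PySem.Dict String (PySem.Dict String String))).keys
      = PySem.List.dedup (rs.map (·.1)) := by
  have h := PySem.Dict.keys_foldl_insert_key rs (fun r => r.1)
    (fun d r => (d.getD r.1 PySem.Dict.empty).insert r.2.1 r.2.2)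
    (PySem.Dict.empty : PySem.Dict String (PySem.Dict String String))
  simpa [pvIns, PySem.Set.update, PySem.List.dedup_eq_ofList, PySem.Set.ofList_eq_foldl] using h

theorem pvNodup_foldl (rs : List (String × String × String)) :
    (rs.foldl pvIns (PySem.Dict.empty : PySem.Dict String (PySem.Dict String String))).keys.Nodup :=
  PySem.Dict.nodup_keys_foldl_insert_key rs (fun r => r.1)
    (fun d r => (d.getD r.1 PySem.Dict.empty).insert r.2.1 r.2.2)
    _ PySem.Dict.nodup_keys_empty

-- ===== VERDICT (by name: the statement is the Claim_ definition above) =====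
theorem build_column_meaning_index_spec : Claim_equal_build_column_meaning_index := by
  intro data _
  show build_column_meaning_index data = build_column_meaning_index_alt data
  unfold build_column_meaning_index build_column_meaning_index_alt
  rw [pvFoldA_eq, pvRecords_eq]
  set rs := data.filterMap pvRec with hrs
  set D := rs.foldl pvIns (PySem.Dict.empty : PySem.Dict String (PySem.Dict String String)) with hD
  rw [PySem.Dict.items_eq_map_keys D (pvNodup_foldl rs) PySem.Dict.empty]
  have hfresh := PySem.Dict.items_foldl_insert_fresh
    (PySem.List.dedup (rs.map (·.1))) (fun db : String => db)
    (fun db => (rs.filter (fun r => r.1 == db)).foldl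
      (fun inner r => inner.insert r.2.1 r.2.2)
      (PySem.Dict.empty : PySem.Dict String String))
    (PySem.Dict.empty : PySem.Dict String (PySem.Dict String String))
    (fun a _ => PySem.Dict.contains_empty a)
    (by simp)
  beta_reduce at hfresh
  rw [show (PySem.Dict.empty : PySem.Dict String (PySem.Dict String String)).items = [] from rfl,
    List.nil_append] at hfresh
  rw [hfresh]
  simp only [List.map_map]
  rw [pvKeys_foldl]
  refine List.map_congr_left ?_
  intro db _
  simp only [Function.comp]
  rw [hD, pvGetD_foldl rs PySem.Dict.empty db, PySem.Dict.getD_empty]
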